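-- pv_equiv track=rewrite | github.com/bushyballs/EXODUS-kernel | dashboard/self_learning.py | _extract_fact_sentence
-- ===== SOURCE A (Python) =====
-- def _extract_fact_sentence(text: str, pattern: str) -> str:
--     """
--     Extract the sentence from text that contains the given pattern.
--     Returns the sentence trimmed to a reasonable length.
--     """
--     text_lower = text.lower()
--     idx = text_lower.find(pattern)
--     if idx == -1:
--         return ""
--
--     # Walk backward to find sentence start
--     start = idx
--     while start > 0 and text[start - 1] not in ".!?\n":
--         start -= 1
--
--     # Walk forward to find sentence end
--     end = idx + len(pattern)
--     while end < len(text) and text[end] not in ".!?\n":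
--         end += 1
--     # Include the punctuation if present
--     if end < len(text):
--         end += 1
--
--     sentence = text[start:end].strip()
--
--     # Cap at 200 chars
--     if len(sentence) > 200:
--         sentence = sentence[:200] + "..."
--
--     return sentence
-- ===== SOURCE B (Python) =====
-- def _extract_fact_sentence(text: str, pattern: str) -> str:
--     """
--     Extract the sentence from text that contains the given pattern,
--     using library search (rfind/find per delimiter) instead of manual walking.
--     """
--     idx = text.lower().find(pattern)
--     if idx == -1:
--         return ""
--
--     delims = ".!?\n"
--     # Sentence start: one past the last delimiter before idx (0 if none).
--     start = max(text.rfind(d, 0, idx) for d in delims) + 1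
--
--     # Sentence end: first delimiter at or after the match (inclusive),
--     # or end of text if there is none.
--     tail_from = idx + len(pattern)
--     hits = [p for p in (text.find(d, tail_from) for d in delims) if p != -1]
--     end = min(hits) + 1 if hits else len(text)
--
--     sentence = text[start:end].strip()
--     if len(sentence) > 200:
--         sentence = sentence[:200] + "..."
--     return sentence
-- ===== Notes on version B (the rewrite author's own statement) =====
-- stated objective: simpler
-- what changed: A's two manual character-walking while-loops (backward to the sentence start, forward to the sentence end) are replaced by per-delimiter rfind/find library searches combined with max/min over the four delimiters.
import Mathlib
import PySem

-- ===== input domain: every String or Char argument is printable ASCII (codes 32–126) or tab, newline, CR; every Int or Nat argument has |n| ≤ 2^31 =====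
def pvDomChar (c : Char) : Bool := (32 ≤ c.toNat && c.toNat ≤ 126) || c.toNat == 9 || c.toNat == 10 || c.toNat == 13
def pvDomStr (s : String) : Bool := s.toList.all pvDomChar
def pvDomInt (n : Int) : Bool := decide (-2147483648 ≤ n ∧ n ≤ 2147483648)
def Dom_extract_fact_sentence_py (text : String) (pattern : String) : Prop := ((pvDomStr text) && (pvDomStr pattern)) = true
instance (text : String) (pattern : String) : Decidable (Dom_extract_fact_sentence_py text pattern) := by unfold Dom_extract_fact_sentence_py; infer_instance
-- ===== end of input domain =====

-- B replaces A's two manual character-walking while-loops by per-delimiter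
-- rfind/find library searches combined with max/min (objective: simpler).

-- ===== PORT A =====

-- c in ".!?\n"  (the sentence-delimiter membership test both Pythons spell)
def pvDelim (c : Char) : Bool := c == '.' || c == '!' || c == '?' || c == '\n'

-- A's backward while-loop: 'while start > 0 and text[start-1] not in ".!?\n": start -= 1'
def pvA_back (t : List Char) : Nat → Nat
  | 0 => 0
  | k + 1 => if pvDelim (t.getD k ' ') then k + 1 else pvA_back t k

-- A's forward while-loop: 'while end < len(text) and text[end] not in ".!?\n": end += 1'
def pvA_fwd (t : List Char) (e : Nat) : Nat :=
  if e < t.length then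
    if pvDelim (t.getD e ' ') then e else pvA_fwd t (e + 1)
  else e
termination_by t.length - e

def extract_fact_sentence_py (text : String) (pattern : String) : String :=
  let t := text.toList
  let p := pattern.toList
  let text_lower := PySem.Chars.lower t
  let idx := PySem.Chars.find text_lower p
  if idx = -1 then "" else
    let start := pvA_back t idx.toNat
    let e0 := pvA_fwd t (idx.toNat + p.length)
    let e : Nat := if e0 < t.length then e0 + 1 else e0
    let sentence := PySem.Chars.strip (PySem.List.slice t (some (start : Int)) (some (e : Int)))
    let sentence := if 200 < sentence.length then PySem.List.slice sentence none (some 200) ++ "...".toList else sentence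
    String.ofList sentence

-- ===== PORT B =====
def extract_fact_sentence_py_alt (text : String) (pattern : String) : String :=
  let t := text.toList
  let p := pattern.toList
  let idx := PySem.Chars.find (PySem.Chars.lower t) p
  if idx = -1 then "" else
    let delims : List Char := ['.', '!', '?', '\n']
    let start := (PySem.List.max? (delims.map (fun d => PySem.Chars.rfindFrom t [d] 0 (some idx))) (fun x => x)).getD (-1) + 1
    let tail_from := idx + (p.length : Int)
    let hits := (delims.map (fun d => PySem.Chars.findFrom t [d] tail_from)).filter (fun q => q != -1)
    let e : Int := match PySem.List.min? hits (fun x => x) with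
      | some m => m + 1
      | none => (t.length : Int)
    let sentence := PySem.Chars.strip (PySem.List.slice t (some start) (some e))
    let sentence := if 200 < sentence.length then PySem.List.slice sentence none (some 200) ++ "...".toList else sentence
    String.ofList sentence

-- ===== PRECONDITION & SPEC =====
def Spec_extract_fact_sentence_py (text : String) (pattern : String) (out : String) : Prop := out = extract_fact_sentence_py_alt text pattern
instance (text : String) (pattern : String) (out : String) : Decidable (Spec_extract_fact_sentence_py text pattern out) := by unfold Spec_extract_fact_sentence_py; infer_instance

-- ===== CLAIM (what is proved, stated in full; the proofs are below) =====
def Claim_equal_extract_fact_sentence_py : Prop := ∀ (text : String) (pattern : String), Dom_extract_fact_sentence_py text pattern → Spec_extract_fact_sentence_py text pattern (extract_fact_sentence_py text pattern)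

-- ===== LEMMAS AND PROOFS =====

def specR (t : List Char) (d : Char) : Nat → Int
  | 0 => -1
  | k + 1 => if t.getD k ' ' == d then (k : Int) else specR t d k

theorem rfind_go_single (t : List Char) (d : Char) (k : Nat) (hk : k ≤ t.length)
    (j : Nat) (hj : j < k) :
    PySem.Chars.rfind.go (t.take k) [d] j = specR t d (j + 1) := by
  induction j with
  | zero =>
    rw [PySem.Chars.rfind.go]
    have h0 : 0 < t.length := by omega
    have : t.take k = t.getD 0 ' ' :: (t.take k).tail := by
      cases t with
      | nil => simp at h0
      | cons a r => cases k with
        | zero => omega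
        | succ k => simp [List.getD]
    rw [this]
    simp [List.isPrefixOf, BEq.comm, specR]
  | succ j ih =>
    rw [PySem.Chars.rfind.go]
    have hdrop : List.drop (j+1) (t.take k) = t.getD (j+1) ' ' :: List.drop (j+2) (t.take k) := by
      have h1 : j + 1 < (t.take k).length := by simp; omega
      have := List.getElem_cons_drop (as := t.take k) (i := j+1) h1
      rw [← this]
      congr 1
      rw [List.getElem_take]
      exact (List.getD_eq_getElem t ' ' (by omega)).symm
    rw [hdrop]
    simp only [List.isPrefixOf, Bool.and_true]
    show (if (d == t.getD (j+1) ' ') = true then ((j:Int)+1) else PySem.Chars.rfind.go (t.take k) [d] j) = specR t d (j + 1 + 1)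
    rw [ih (by omega)]
    simp only [specR]
    rw [BEq.comm]
    split <;> push_cast <;> ring_nf

theorem rfind_take_single (t : List Char) (d : Char) (k : Nat) (hk : k ≤ t.length) :
    PySem.Chars.rfind (t.take k) [d] = specR t d k := by
  have hlen : (t.take k).length = k := by simp; omega
  rw [PySem.Chars.rfind, hlen]
  cases k with
  | zero =>
    rw [PySem.Chars.rfind.go]
    have : t.take 0 = ([] : List Char) := by simp
    rw [this]
    simp [List.isPrefixOf, specR]
  | succ j =>
    rw [PySem.Chars.rfind.go]
    have hd : List.drop (j+1) (t.take (j+1)) = [] := by simp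
    rw [hd]
    simp only [List.isPrefixOf]
    simp only [if_false, Bool.false_eq_true]
    exact rfind_go_single t d (j+1) hk j (by omega)

theorem rfindFrom_zero_take (t : List Char) (d : Char) (k : Nat) (hk : k ≤ t.length) :
    PySem.Chars.rfindFrom t [d] 0 (some (k : Int)) = PySem.Chars.rfind (t.take k) [d] := by
  rw [PySem.Chars.rfindFrom]
  have h1 : ¬ ((t.length : Int) < (k : Int)) := by push_cast; omega
  have h2 : ¬ ((k : Int) < 0) := by omega
  norm_num [h1, h2]
  exact fun h => h.symm

def specB (t : List Char) : Nat → Int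
  | 0 => -1
  | k + 1 => if pvDelim (t.getD k ' ') then (k : Int) else specB t k

theorem specR_lt (t : List Char) (d : Char) (k : Nat) : specR t d k < (k : Int) := by
  induction k with
  | zero => simp [specR]
  | succ k ih => simp only [specR]; split <;> push_cast <;> omega

theorem max_specR (t : List Char) (k : Nat) :
    max (max (max (specR t '.' k) (specR t '!' k)) (specR t '?' k)) (specR t '\n' k)
      = specB t k := by
  induction k with
  | zero => simp [specR, specB]
  | succ k ih =>
    have b1 := specR_lt t '.' k
    have b2 := specR_lt t '!' k
    have b3 := specR_lt t '?' k
    have b4 := specR_lt t '\n' k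
    simp only [specR, specB, pvDelim]
    by_cases h1 : t.getD k ' ' = '.' <;> by_cases h2 : t.getD k ' ' = '!' <;>
      by_cases h3 : t.getD k ' ' = '?' <;> by_cases h4 : t.getD k ' ' = '\n' <;>
      simp_all <;> omega

theorem find_single_nil (d : Char) : PySem.Chars.find [] [d] = -1 := by
  simp [PySem.Chars.find, PySem.Chars.find.go, List.isEmpty]

theorem find_go_neg_one_le (sub : List Char) (l : List Char) (k : Nat) :
    -1 ≤ PySem.Chars.find.go sub l k := by
  induction l generalizing k with
  | nil => rw [PySem.Chars.find.go]; split <;> omega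
  | cons c l ih => rw [PySem.Chars.find.go]; split; omega; exact ih (k+1)

theorem find_go_single (d : Char) (l : List Char) (k : Nat) :
    PySem.Chars.find.go [d] l k =
      if PySem.Chars.find l [d] = -1 then -1 else (k : Int) + PySem.Chars.find l [d] := by
  induction l generalizing k with
  | nil => simp [PySem.Chars.find, PySem.Chars.find.go, List.isEmpty]
  | cons c l ih =>
    rw [PySem.Chars.find.go]
    rw [show PySem.Chars.find (c :: l) [d] = PySem.Chars.find.go [d] (c :: l) 0 from rfl]
    rw [PySem.Chars.find.go]
    simp only [List.isPrefixOf, Bool.and_true]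
    by_cases h : (d == c) = true
    · simp [h]
    · simp only [h, if_false, Bool.false_eq_true]
      rw [show (0:Nat)+1 = 1 from rfl, ih (k+1), ih 1]
      have := find_go_neg_one_le [d] l 0
      rw [ih 0] at this
      split_ifs <;> push_cast at this ⊢ <;> omega

theorem find_single_cons (d c : Char) (l : List Char) :
    PySem.Chars.find (c :: l) [d] =
      if c == d then 0
      else if PySem.Chars.find l [d] = -1 then -1 else 1 + PySem.Chars.find l [d] := by
  rw [show PySem.Chars.find (c :: l) [d] = PySem.Chars.find.go [d] (c :: l) 0 from rfl]
  rw [PySem.Chars.find.go]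
  simp only [List.isPrefixOf, Bool.and_true]
  rw [BEq.comm, find_go_single]
  split_ifs <;> simp_all

def specFirst : List Char → Option Nat
  | [] => none
  | c :: l => if pvDelim c then some 0 else (specFirst l).map (· + 1)

theorem find_single_neg_one_le (d : Char) (l : List Char) : -1 ≤ PySem.Chars.find l [d] := by
  exact find_go_neg_one_le [d] l 0

theorem shiftFilter (c : Int) (hc : 0 ≤ c) (xs : List Int) (h : ∀ r ∈ xs, -1 ≤ r) :
    (xs.map (fun r => if r = -1 then -1 else c + r)).filter (fun q => q != -1) =
      (xs.filter (fun q => q != -1)).map (fun r => c + r) := by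
  induction xs with
  | nil => rfl
  | cons x xs ih =>
    have hx := h x (by simp)
    have hr := ih (fun r hr => h r (by simp [hr]))
    by_cases hx1 : x = -1
    · simp [hx1, hr]
    · have : (c + x) ≠ -1 := by omega
      simp [List.filter_cons, List.map_cons, hx1, this, hr]

theorem foldl_min_shift (c : Int) (t : List Int) (a : Int) :
    (t.map (fun r => c + r)).foldl min (c + a) = c + t.foldl min a := by
  induction t generalizing a with
  | nil => rfl
  | cons x t ih =>
    simp only [List.map_cons, List.foldl_cons]
    rw [show min (c + a) (c + x) = c + min a x by omega]
    exact ih (min a x)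

theorem min?_map_shift (c : Int) (xs : List Int) :
    PySem.List.min? (xs.map (fun r => c + r)) (fun x => x) =
      (PySem.List.min? xs (fun x => x)).map (fun r => c + r) := by
  cases xs with
  | nil => rfl
  | cons x t =>
    rw [PySem.List.min?_id_cons, List.map_cons, PySem.List.min?_id_cons, foldl_min_shift]
    rfl

theorem min?_eq_zero (xs : List Int) (h0 : (0:Int) ∈ xs) (hnn : ∀ x ∈ xs, 0 ≤ x) :
    PySem.List.min? xs (fun x => x) = some 0 := by
  cases hm : PySem.List.min? xs (fun x => x) with
  | none => rw [PySem.List.min?_eq_none_iff] at hm; subst hm; simp at h0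
  | some m =>
    have h1 := PySem.List.min?_mem hm
    have h2 := PySem.List.min?_isMin hm 0 h0
    have h3 := hnn m h1
    have : m = 0 := le_antisymm h2 h3
    rw [this]

theorem min_specFirst (l : List Char) :
    PySem.List.min? (([('.' : Char), '!', '?', '\n'].map
        (fun d => PySem.Chars.find l [d])).filter (fun q => q != -1)) (fun x => x)
      = (specFirst l).map (fun j => (j : Int)) := by
  induction l with
  | nil => simp [find_single_nil, specFirst]
  | cons c l ih =>
    simp only [List.map_cons, List.map_nil] at ih ⊢
    rw [find_single_cons, find_single_cons, find_single_cons, find_single_cons]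
    have b1 := find_single_neg_one_le '.' l
    have b2 := find_single_neg_one_le '!' l
    have b3 := find_single_neg_one_le '?' l
    have b4 := find_single_neg_one_le '\n' l
    by_cases h1 : c = '.'
    · subst h1
      norm_num
      rw [min?_eq_zero]
      · simp [specFirst, pvDelim]
      · simp
      · intro x hx
        simp [List.mem_filter] at hx
        rcases hx with ⟨h, hne⟩ | ⟨h, hne⟩ | ⟨h, hne⟩ | h <;>
          first | omega | (split_ifs at * <;> omega)
    · by_cases h2 : c = '!'
      · subst h2
        norm_num
        rw [min?_eq_zero]
        · simp [specFirst, pvDelim]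
        · simp
        · intro x hx
          simp [List.mem_filter] at hx
          rcases hx with ⟨h, hne⟩ | ⟨h, hne⟩ | ⟨h, hne⟩ | h <;>
            first | omega | (split_ifs at * <;> omega)
      · by_cases h3 : c = '?'
        · subst h3
          norm_num
          rw [min?_eq_zero]
          · simp [specFirst, pvDelim]
          · simp
          · intro x hx
            simp [List.mem_filter] at hx
            rcases hx with ⟨h, hne⟩ | ⟨h, hne⟩ | ⟨h, hne⟩ | h <;>
              first | omega | (split_ifs at * <;> omega)
        · by_cases h4 : c = '\n'
          · subst h4
            norm_num
            rw [min?_eq_zero]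
            · simp [specFirst, pvDelim]
            · simp
            · intro x hx
              simp [List.mem_filter] at hx
              rcases hx with ⟨h, hne⟩ | ⟨h, hne⟩ | ⟨h, hne⟩ | h <;>
                first | omega | (split_ifs at * <;> omega)
          · simp only [beq_iff_eq, h1, h2, h3, h4, if_false]
            have hmap : ([if PySem.Chars.find l ['.'] = -1 then -1 else 1 + PySem.Chars.find l ['.'],
                if PySem.Chars.find l ['!'] = -1 then -1 else 1 + PySem.Chars.find l ['!'],
                if PySem.Chars.find l ['?'] = -1 then -1 else 1 + PySem.Chars.find l ['?'],
                if PySem.Chars.find l ['\n'] = -1 then -1 else 1 + PySem.Chars.find l ['\n']] : List Int)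
                = ([PySem.Chars.find l ['.'], PySem.Chars.find l ['!'], PySem.Chars.find l ['?'],
                    PySem.Chars.find l ['\n']].map (fun r => if r = -1 then -1 else 1 + r)) := by
              simp
            rw [hmap, shiftFilter (1:Int) (by omega) _ (by intro r hr; simp at hr; rcases hr with h|h|h|h <;> subst h <;> assumption)]
            rw [min?_map_shift, ih]
            simp only [specFirst, pvDelim]
            have hc : (pvDelim c) = false := by
              simp [pvDelim, h1, h2, h3, h4]
            simp [pvDelim, h1, h2, h3, h4]
            cases specFirst l <;> simp <;> push_cast <;> ring

theorem pvA_fwd_eq (t : List Char) (e : Nat) (he : e ≤ t.length) :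
    pvA_fwd t e = match specFirst (t.drop e) with
      | some j => e + j
      | none => t.length := by
  induction hn : t.length - e generalizing e with
  | zero =>
    have : e = t.length := by omega
    subst this
    rw [pvA_fwd]
    simp [specFirst]
  | succ n ih =>
    have h : e < t.length := by omega
    have hdrop : t.drop e = t.getD e ' ' :: t.drop (e+1) := by
      have := List.getElem_cons_drop (as := t) (i := e) h
      rw [← this]
      congr 1
      exact (List.getD_eq_getElem t ' ' h).symm
    rw [pvA_fwd, if_pos h, hdrop]
    simp only [specFirst]
    by_cases hd : pvDelim (t.getD e ' ')
    · rw [if_pos hd, if_pos hd]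
      show e = e + 0
      omega
    · rw [if_neg hd, if_neg hd]
      rw [ih (e+1) (by omega) (by omega)]
      cases hq : specFirst (t.drop (e+1)) with
      | none => rfl
      | some v =>
        show e + 1 + v = e + (v + 1)
        omega

theorem find_go_le (sub l : List Char) (k : Nat) :
    PySem.Chars.find.go sub l k ≤ (k : Int) + l.length := by
  induction l generalizing k with
  | nil => rw [PySem.Chars.find.go]; split <;> simp <;> omega
  | cons c l ih =>
    rw [PySem.Chars.find.go]
    split
    · simp; omega
    · have := ih (k+1); simp at this ⊢; push_cast at this ⊢; omega

theorem find_le (s sub : List Char) : PySem.Chars.find s sub ≤ (s.length : Int) := by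
  have := find_go_le sub s 0
  simpa [PySem.Chars.find] using this

theorem pvA_back_eq (t : List Char) (k : Nat) : (pvA_back t k : Int) = specB t k + 1 := by
  induction k with
  | zero => simp [pvA_back, specB]
  | succ k ih => simp only [pvA_back, specB]; split <;> push_cast <;> omega

theorem specFirst_lt_length (l : List Char) (j : Nat) (h : specFirst l = some j) : j < l.length := by
  induction l generalizing j with
  | nil => simp [specFirst] at h
  | cons c l ih =>
    simp only [specFirst] at h
    split at h
    · simp only [Option.some.injEq] at h; simp; omega
    · cases hq : specFirst l with
      | none => rw [hq] at h; simp at h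
      | some j' =>
        rw [hq] at h
        simp only [Option.map_some, Option.some.injEq] at h
        have := ih j' hq
        simp only [List.length_cons]
        omega

-- B's start expression equals A's backward-walk start, as Ints
theorem start_eq (t : List Char) (i : Int) (h0 : 0 ≤ i) (hk : i.toNat ≤ t.length) :
    (PySem.List.max? (([('.' : Char), '!', '?', '\n'].map
        (fun d => PySem.Chars.rfindFrom t [d] 0 (some i))) ) (fun x => x)).getD (-1) + 1
      = ((pvA_back t i.toNat : Nat) : Int) := by
  rw [show i = ((i.toNat : Nat) : Int) from (Int.toNat_of_nonneg h0).symm]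
  simp only [List.map_cons, List.map_nil, Int.toNat_natCast]
  rw [rfindFrom_zero_take t '.' _ hk, rfindFrom_zero_take t '!' _ hk,
      rfindFrom_zero_take t '?' _ hk, rfindFrom_zero_take t '\n' _ hk]
  rw [rfind_take_single t '.' _ hk, rfind_take_single t '!' _ hk,
      rfind_take_single t '?' _ hk, rfind_take_single t '\n' _ hk]
  rw [PySem.List.max?_id_cons]
  simp only [List.foldl_cons, List.foldl_nil, Option.getD_some]
  rw [max_specR, pvA_back_eq]

-- B's end expression equals A's forward-walk end (with the +1 cap), as Ints
theorem end_eq (t p : List Char) (i : Int) (h0 : 0 ≤ i) (hm : i.toNat + p.length ≤ t.length) :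
    (match PySem.List.min? ((([('.' : Char), '!', '?', '\n'].map
          (fun d => PySem.Chars.findFrom t [d] (i + (p.length : Int)))).filter
            (fun q => q != -1))) (fun x => x) with
      | some m => m + 1
      | none => (t.length : Int))
      = ((if pvA_fwd t (i.toNat + p.length) < t.length
            then pvA_fwd t (i.toNat + p.length) + 1
            else pvA_fwd t (i.toNat + p.length) : Nat) : Int) := by
  have hmm : (i + (p.length : Int)) = ((i.toNat + p.length : Nat) : Int) := by push_cast; omega
  rw [hmm]
  set m : Nat := i.toNat + p.length with hmdef
  have hmle : m ≤ t.length := hm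
  simp only [List.map_cons, List.map_nil]
  rw [PySem.Chars.findFrom_natCast t ['.'] m hmle, PySem.Chars.findFrom_natCast t ['!'] m hmle,
      PySem.Chars.findFrom_natCast t ['?'] m hmle, PySem.Chars.findFrom_natCast t ['\n'] m hmle]
  have hmap : ([if PySem.Chars.find (t.drop m) ['.'] = -1 then -1 else (m : Int) + PySem.Chars.find (t.drop m) ['.'],
      if PySem.Chars.find (t.drop m) ['!'] = -1 then -1 else (m : Int) + PySem.Chars.find (t.drop m) ['!'],
      if PySem.Chars.find (t.drop m) ['?'] = -1 then -1 else (m : Int) + PySem.Chars.find (t.drop m) ['?'],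
      if PySem.Chars.find (t.drop m) ['\n'] = -1 then -1 else (m : Int) + PySem.Chars.find (t.drop m) ['\n']] : List Int)
      = ([PySem.Chars.find (t.drop m) ['.'], PySem.Chars.find (t.drop m) ['!'],
          PySem.Chars.find (t.drop m) ['?'], PySem.Chars.find (t.drop m) ['\n']].map
            (fun r => if r = -1 then -1 else (m : Int) + r)) := by simp
  rw [hmap, shiftFilter (m : Int) (by positivity) _
        (by intro r hr; simp at hr; rcases hr with h|h|h|h <;> subst h <;> exact find_single_neg_one_le _ _)]
  rw [min?_map_shift]
  have hmin := min_specFirst (t.drop m)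
  simp only [List.map_cons, List.map_nil] at hmin
  rw [hmin]
  rw [pvA_fwd_eq t m hmle]
  cases hq : specFirst (t.drop m) with
  | none =>
    show ((t.length : Nat) : Int) = ((if t.length < t.length then t.length + 1 else t.length : Nat) : Int)
    rw [if_neg (lt_irrefl _)]
  | some j =>
    have hj := specFirst_lt_length (t.drop m) j hq
    rw [List.length_drop] at hj
    show ((m : Int) + (j : Int)) + 1 = ((if m + j < t.length then m + j + 1 else m + j : Nat) : Int)
    rw [if_pos (by omega)]
    push_cast
    ring

-- a successful find gives 0 ≤ idx and idx + len(pattern) ≤ len(text)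
theorem main_core (t p : List Char)
    (hne : PySem.Chars.find (PySem.Chars.lower t) p ≠ -1) :
    0 ≤ PySem.Chars.find (PySem.Chars.lower t) p ∧
      (PySem.Chars.find (PySem.Chars.lower t) p).toNat + p.length ≤ t.length := by
  set i := PySem.Chars.find (PySem.Chars.lower t) p with hi
  have hf : PySem.Chars.findFrom (PySem.Chars.lower t) p ((0 : Nat) : Int) ≠ -1 := by
    rw [show ((0 : Nat) : Int) = 0 from rfl, PySem.Chars.findFrom_zero]; exact hne
  have hspec := PySem.Chars.findFrom_natCast_spec (PySem.Chars.lower t) p 0 (by omega) hf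
  rw [show ((0 : Nat) : Int) = 0 from rfl, PySem.Chars.findFrom_zero, ← hi] at hspec
  obtain ⟨h0, hpre, -⟩ := hspec
  have hlen : (PySem.Chars.lower t).length = t.length := by
    simp [PySem.Chars.lower]
  have hle : i ≤ (t.length : Int) := by
    have := find_le (PySem.Chars.lower t) p
    rw [← hi, hlen] at this
    exact this
  refine ⟨by exact_mod_cast h0, ?_⟩
  have hplen := hpre.length_le
  rw [List.length_drop, hlen] at hplen
  omega

theorem extract_fact_sentence_py_spec : Claim_equal_extract_fact_sentence_py := by
  intro text pattern _hdom
  unfold Spec_extract_fact_sentence_py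
  unfold extract_fact_sentence_py extract_fact_sentence_py_alt
  simp only []
  by_cases hidx : PySem.Chars.find (PySem.Chars.lower text.toList) pattern.toList = -1
  · rw [if_pos hidx, if_pos hidx]
  · rw [if_neg hidx, if_neg hidx]
    obtain ⟨h0, hm⟩ := main_core text.toList pattern.toList hidx
    have hk : (PySem.Chars.find (PySem.Chars.lower text.toList) pattern.toList).toNat ≤ text.toList.length := by omega
    rw [start_eq text.toList _ h0 hk, end_eq text.toList pattern.toList _ h0 hm]
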